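-- pv_equiv track=rewrite | github.com/tstu92197t/SC-project | stanCode_Projects/hangman_game/similarity.py | best_match
-- ===== SOURCE A (Python) =====
-- def best_match(ref, read):
--     """
--     param ref: str, the long sequence provided by the user
--     param read: str, the short sequence provided by the user
--     param similarity: integer, the similar degree (if match, similarity will plus one)
--     param max: integer, the maximum
--     param index: integer
--     return str
--     """
--     similarity = 0
--     max_value = 0
--     index = 0
--     for i in range(len(ref)-len(read)+1):  # the comparison between ref and read has len(ref)-len(read)+1 times
--         for j in range(len(read)):  # at a time, the sub sequence of the ref will compares with read for len(read) times
--             if ref[j+i] == read[j]: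
--                 similarity += 1
--                 if similarity > max_value:
--                     max_value = similarity
--                     index = i
--         similarity = 0  # before another comparision between ref and read, we will initialize the similarity
--     ans = ''
--     for base in ref[index:(index+len(read))]:
--         if base == 'A':
--             ans += 'A'
--         elif base == 'T':
--             ans += 'T'
--         elif base == 'C':
--             ans += 'C'
--         else:
--             ans += 'G'
--     return ans
-- ===== SOURCE B (Python) =====
-- def _first_at_least(a, x):
--     lo, hi = 0, len(a)
--     while lo < hi:
--         mid = (lo + hi) // 2
--         if a[mid] < x:
--             lo = mid + 1
--         else:
--             hi = mid
--     return lo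
--
--
-- def best_match(ref, read):
--     n, m = len(ref), len(read)
--     k = n - m + 1
--     votes = [0] * max(k, 0)
--     positions = {}
--     for j, ch in enumerate(read):
--         positions[ch] = positions.get(ch, []) + [j]
--     for p, ch in enumerate(ref):
--         js = positions.get(ch, [])
--         i = _first_at_least(js, p - k + 1)
--         while i < len(js) and js[i] <= p:
--             votes[p - js[i]] += 1
--             i += 1
--     best = votes.index(max(votes)) if votes else 0
--     return ''.join(c if c in 'ATC' else 'G' for c in ref[best:best + m])
-- ===== Notes on version B (the rewrite author's own statement) =====
-- stated objective: alternative
-- what changed: Replaces A's window-by-window rescanning (compare every offset's full window against read) by an inverted index of read positions per character plus a voting pass over ref that, via binary search, visits only the in-window matching positions and tallies offsets; then argmax over the tally array and translate.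
import Mathlib
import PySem

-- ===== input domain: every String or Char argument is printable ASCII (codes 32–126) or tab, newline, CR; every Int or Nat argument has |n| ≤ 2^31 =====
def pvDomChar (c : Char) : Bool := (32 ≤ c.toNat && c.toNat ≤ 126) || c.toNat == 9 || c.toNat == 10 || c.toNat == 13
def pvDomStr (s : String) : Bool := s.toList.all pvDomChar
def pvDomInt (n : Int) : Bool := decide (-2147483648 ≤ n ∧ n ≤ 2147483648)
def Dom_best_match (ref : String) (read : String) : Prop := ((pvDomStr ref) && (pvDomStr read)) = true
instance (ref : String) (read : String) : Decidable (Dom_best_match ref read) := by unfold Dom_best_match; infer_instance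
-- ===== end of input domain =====

-- B replaces A's window-by-window rescanning by an inverted index of read positions per
-- character plus a voting pass over ref that visits only in-window matching positions
-- (located by binary search) and tallies offsets (objective: alternative algorithm).

-- ===== PORT A =====
def best_match (ref : String) (read : String) : String :=
  let rl := ref.toList
  let dl := read.toList
  let st := (PySem.List.pyRange 0 ((rl.length : Int) - (dl.length : Int) + 1) 1).foldl
    (fun (st : Int × Int × Int) i =>
      let st2 := (PySem.List.pyRange 0 ((dl.length : Int)) 1).foldl
        (fun (s : Int × Int × Int) j =>
          if PySem.List.pyGet? rl (j + i) = PySem.List.pyGet? dl j then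
            if s.2.1 < s.1 + 1 then (s.1 + 1, s.1 + 1, i) else (s.1 + 1, s.2.1, s.2.2)
          else s) st
      (0, st2.2.1, st2.2.2)) (0, 0, 0)
  let ans := (PySem.List.slice rl (some st.2.2) (some (st.2.2 + (dl.length : Int)))).foldl
    (fun (acc : List Char) base =>
      if base = 'A' then acc ++ ['A']
      else if base = 'T' then acc ++ ['T']
      else if base = 'C' then acc ++ ['C']
      else acc ++ ['G']) []
  String.ofList ans

-- ===== PORT B =====
-- port of Source B's _first_at_least: binary search for the first index with a[idx] >= x
def pvBisectGo (a : List Int) (x : Int) : Nat → Nat → Nat → Nat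
  | 0, lo, _ => lo
  | fuel + 1, lo, hi =>
    if lo < hi then
      if a.getD ((lo + hi) / 2) 0 < x then pvBisectGo a x fuel ((lo + hi) / 2 + 1) hi
      else pvBisectGo a x fuel lo ((lo + hi) / 2)
    else lo

-- port of Source B's inner while loop: vote for each js[i] <= p, advancing i
-- (votes[off] += 1 is ported as set/getD at off.toNat; the loop only reaches
-- indices the Python loop reaches, where 0 <= off < k holds)
def pvVoteGo (p : Int) (js : List Int) : Nat → List Int → Nat → List Int
  | 0, v, _ => v
  | fuel + 1, v, i =>
    if i < js.length ∧ js.getD i 0 ≤ p then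
      pvVoteGo p js fuel (v.set (p - js.getD i 0).toNat (v.getD (p - js.getD i 0).toNat 0 + 1)) (i + 1)
    else v

def best_match_alt (ref : String) (read : String) : String :=
  let rl := ref.toList
  let dl := read.toList
  let k : Int := (rl.length : Int) - (dl.length : Int) + 1
  let votes0 : List Int := List.replicate (max k 0).toNat 0
  let positions : PySem.Dict Char (List Int) :=
    (PySem.List.enumerate dl 0).foldl
      (fun d jc => d.modify jc.2 [] (· ++ [jc.1])) PySem.Dict.empty
  let votes : List Int :=
    (PySem.List.enumerate rl 0).foldl
      (fun (v : List Int) pc =>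
        pvVoteGo pc.1 (positions.getD pc.2 []) (positions.getD pc.2 []).length v
          (pvBisectGo (positions.getD pc.2 []) (pc.1 - k + 1) (positions.getD pc.2 []).length 0
            (positions.getD pc.2 []).length))
      votes0
  let best : Int :=
    match PySem.List.max? votes id with
    | none => 0
    | some mx => ((PySem.List.index? votes mx).getD 0 : Nat)
  String.ofList ((PySem.List.slice rl (some best) (some (best + (dl.length : Int)))).map
    (fun c => if c ∈ (['A','T','C'] : List Char) then c else 'G'))

-- ===== PRECONDITION & SPEC =====
def Spec_best_match (ref : String) (read : String) (out : String) : Prop := out = best_match_alt ref read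
instance (ref : String) (read : String) (out : String) : Decidable (Spec_best_match ref read out) := by unfold Spec_best_match; infer_instance

-- ===== CLAIM (what is proved, stated in full; the proofs are below) =====
def Claim_equal_best_match : Prop := ∀ (ref : String) (read : String), Dom_best_match ref read → Spec_best_match ref read (best_match ref read)

-- ===== LEMMAS AND PROOFS =====

theorem pv_innerA (cond : Int → Prop) [DecidablePred cond] (ii : Int) :
    ∀ (n : Nat) (a b : Int), (b - a).toNat = n → ∀ (s mv idx : Int), s ≤ mv →
    (PySem.List.pyRange a b 1).foldl
      (fun (st : Int × Int × Int) j =>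
        if cond j then
          if st.2.1 < st.1 + 1 then (st.1 + 1, st.1 + 1, ii) else (st.1 + 1, st.2.1, st.2.2)
        else st) (s, mv, idx)
    = (s + (((PySem.List.pyRange a b 1).countP (fun j => decide (cond j)) : Nat) : Int),
       if mv < s + (((PySem.List.pyRange a b 1).countP (fun j => decide (cond j)) : Nat) : Int)
       then (s + (((PySem.List.pyRange a b 1).countP (fun j => decide (cond j)) : Nat) : Int), ii)
       else (mv, idx)) := by
  intro n
  induction n with
  | zero =>
    intro a b hab s mv idx hs
    rw [PySem.List.pyRange_one_eq_nil (by omega)]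
    simp only [List.foldl_nil, List.countP_nil, Nat.cast_zero, add_zero]
    rw [if_neg (by omega)]
  | succ k ih =>
    intro a b hab s mv idx hs
    rw [PySem.List.pyRange_one_cons (by omega)]
    simp only [List.foldl_cons, List.countP_cons]
    by_cases hc : cond a
    · rw [if_pos hc]
      simp only [hc, decide_true, if_true]
      by_cases hup : mv < s + 1
      · rw [if_pos (by omega)]
        rw [ih (a+1) b (by omega) (s+1) (s+1) ii (le_refl _)]
        generalize List.countP (fun j => decide (cond j)) (PySem.List.pyRange (a+1) b 1) = C
        rw [if_pos (show mv < s + ((C+1 : Nat) : Int) from by omega)]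
        by_cases h0 : s + 1 < s + 1 + (C : Int)
        · rw [if_pos h0]
          simp only [Prod.mk.injEq, and_true]
          omega
        · rw [if_neg h0]
          simp only [Prod.mk.injEq, and_true]
          omega
      · rw [if_neg (by omega)]
        rw [ih (a+1) b (by omega) (s+1) mv idx (by omega)]
        generalize List.countP (fun j => decide (cond j)) (PySem.List.pyRange (a+1) b 1) = C
        by_cases h0 : mv < s + 1 + (C : Int)
        · rw [if_pos h0, if_pos (show mv < s + ((C+1 : Nat) : Int) from by omega)]
          simp only [Prod.mk.injEq, and_true]
          omega
        · rw [if_neg h0, if_neg (show ¬ mv < s + ((C+1 : Nat) : Int) from by omega)]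
          simp only [Prod.mk.injEq, and_true]
          omega
    · rw [if_neg hc]
      simp only [hc, decide_false]
      simp only [Bool.false_eq_true, if_false]
      exact ih (a+1) b (by omega) s mv idx hs

def pvCnt (rl dl : List Char) (i : Int) : Int :=
  (((PySem.List.pyRange 0 ((dl.length : Int)) 1).countP
    (fun j => decide (PySem.List.pyGet? rl (j + i) = PySem.List.pyGet? dl j)) : Nat) : Int)

def pvScan (f : Int → Int) : List Int → Int → Int → Int × Int
  | [], mv, idx => (mv, idx)
  | i :: rest, mv, idx =>
      if mv < f i then pvScan f rest (f i) i else pvScan f rest mv idx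

theorem pv_inner_closed (rl dl : List Char) (i : Int) (mv idx : Int) (hmv : 0 ≤ mv) :
    (PySem.List.pyRange 0 ((dl.length : Int)) 1).foldl
      (fun (s : Int × Int × Int) j =>
        if PySem.List.pyGet? rl (j + i) = PySem.List.pyGet? dl j then
          if s.2.1 < s.1 + 1 then (s.1 + 1, s.1 + 1, i) else (s.1 + 1, s.2.1, s.2.2)
        else s) (0, mv, idx)
    = (pvCnt rl dl i, if mv < pvCnt rl dl i then (pvCnt rl dl i, i) else (mv, idx)) := by
  have h := pv_innerA (fun j => PySem.List.pyGet? rl (j + i) = PySem.List.pyGet? dl j) i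
      ((dl.length : Int) - 0).toNat 0 ((dl.length : Int)) rfl 0 mv idx hmv
  simpa [pvCnt] using h

theorem pv_cnt_nonneg (rl dl : List Char) (i : Int) : 0 ≤ pvCnt rl dl i := by
  simp [pvCnt]

theorem pv_outerA (rl dl : List Char) :
    ∀ (n : Nat) (a b : Int), (b - a).toNat = n → ∀ (mv idx : Int), 0 ≤ mv →
    (PySem.List.pyRange a b 1).foldl
      (fun (st : Int × Int × Int) i =>
        let st2 := (PySem.List.pyRange 0 ((dl.length : Int)) 1).foldl
          (fun (s : Int × Int × Int) j =>
            if PySem.List.pyGet? rl (j + i) = PySem.List.pyGet? dl j then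
              if s.2.1 < s.1 + 1 then (s.1 + 1, s.1 + 1, i) else (s.1 + 1, s.2.1, s.2.2)
            else s) st
        (0, st2.2.1, st2.2.2)) (0, mv, idx)
    = (0, pvScan (pvCnt rl dl) (PySem.List.pyRange a b 1) mv idx) := by
  intro n
  induction n with
  | zero =>
    intro a b hab mv idx _
    have hnil : PySem.List.pyRange a b 1 = [] := PySem.List.pyRange_one_eq_nil (by omega)
    rw [hnil]
    rfl
  | succ k ih =>
    intro a b hab mv idx hmv
    have hcons : PySem.List.pyRange a b 1 = a :: PySem.List.pyRange (a+1) b 1 :=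
      PySem.List.pyRange_one_cons (by omega)
    rw [hcons]
    simp only [List.foldl_cons]
    rw [pv_inner_closed rl dl a mv idx hmv]
    by_cases h : mv < pvCnt rl dl a
    · rw [if_pos h]
      simp only
      rw [ih (a+1) b (by omega) (pvCnt rl dl a) a (pv_cnt_nonneg rl dl a)]
      simp only [pvScan]
      rw [if_pos h]
    · rw [if_neg h]
      simp only
      rw [ih (a+1) b (by omega) mv idx hmv]
      simp only [pvScan]
      rw [if_neg h]

theorem pv_max?_step (a b : Int) (l : List Int) :
    PySem.List.max? (a :: b :: l) id = PySem.List.max? ((if a < b then b else a) :: l) id := by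
  by_cases h : a < b <;> simp [PySem.List.max?, h]

theorem pv_max?_cons (xs : List Int) : ∀ (x : Int),
    PySem.List.max? (x :: xs) id
    = some (match PySem.List.max? xs id with | none => x | some M => if x < M then M else x) := by
  induction xs with
  | nil => intro x; simp [PySem.List.max?]
  | cons y xs ih =>
    intro x
    rw [pv_max?_step x y xs, ih ((if x < y then y else x)), ih y]
    rcases hM : PySem.List.max? xs id with _ | M
    all_goals dsimp only
    all_goals (congr 1; split_ifs <;> omega)

theorem pv_scan_spec (f : Int → Int) :
    ∀ (n : Nat) (a b : Int), (b - a).toNat = n → ∀ (mv idx : Int),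
    (match PySem.List.max? ((PySem.List.pyRange a b 1).map f) id with
     | none => pvScan f (PySem.List.pyRange a b 1) mv idx = (mv, idx)
     | some M =>
        if mv < M then
          pvScan f (PySem.List.pyRange a b 1) mv idx
            = (M, a + (((PySem.List.index? ((PySem.List.pyRange a b 1).map f) M).getD 0 : Nat) : Int))
        else pvScan f (PySem.List.pyRange a b 1) mv idx = (mv, idx) : Prop) := by
  intro n
  induction n with
  | zero =>
    intro a b hab mv idx
    have hnil : PySem.List.pyRange a b 1 = [] := PySem.List.pyRange_one_eq_nil (by omega)
    rw [hnil]
    exact rfl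
  | succ k ih =>
    intro a b hab mv idx
    have hcons : PySem.List.pyRange a b 1 = a :: PySem.List.pyRange (a+1) b 1 :=
      PySem.List.pyRange_one_cons (by omega)
    rw [hcons]
    simp only [List.map_cons, pv_max?_cons]
    rcases hM : PySem.List.max? ((PySem.List.pyRange (a+1) b 1).map f) id with _ | M'
    · -- the tail of the range is empty
      have hrest : PySem.List.pyRange (a+1) b 1 = [] := by
        cases hr : PySem.List.pyRange (a+1) b 1 with
        | nil => rfl
        | cons z zs =>
          rw [hr, List.map_cons, pv_max?_cons] at hM
          exact absurd hM (by simp)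
      rw [hrest]
      dsimp only
      by_cases h : mv < f a
      · rw [if_pos h]
        simp only [pvScan, if_pos h, PySem.List.index?_cons_self]
        simp
      · rw [if_neg h]
        simp only [pvScan, if_neg h]
    · dsimp only
      have hIH := ih (a+1) b (by omega)
      rw [hM] at hIH
      dsimp only at hIH
      by_cases hfM : f a < M'
      · simp only [if_pos hfM]
        have hmem : M' ∈ (PySem.List.pyRange (a+1) b 1).map f := PySem.List.max?_mem hM
        obtain ⟨kk, hkk⟩ :=
          Option.isSome_iff_exists.mp ((PySem.List.index?_isSome_iff _ _).mpr hmem)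
        have hidx : PySem.List.index? (f a :: (PySem.List.pyRange (a+1) b 1).map f) M'
            = some (kk + 1) := by
          rw [PySem.List.index?_cons_of_ne _ (show f a ≠ M' by omega), hkk]
          rfl
        by_cases h : mv < f a
        · rw [if_pos (show mv < M' by omega)]
          simp only [pvScan, if_pos h]
          have h2 := hIH (f a) a
          rw [if_pos hfM] at h2
          rw [h2, hidx, hkk]
          simp only [Option.getD_some, Prod.mk.injEq]
          exact ⟨trivial, by omega⟩
        · by_cases h2 : mv < M'
          · rw [if_pos h2]
            simp only [pvScan, if_neg h]
            have h3 := hIH mv idx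
            rw [if_pos h2] at h3
            rw [h3, hidx, hkk]
            simp only [Option.getD_some, Prod.mk.injEq]
            exact ⟨trivial, by omega⟩
          · rw [if_neg h2]
            simp only [pvScan, if_neg h]
            have h3 := hIH mv idx
            rw [if_neg h2] at h3
            exact h3
      · simp only [if_neg hfM]
        by_cases h : mv < f a
        · rw [if_pos h]
          simp only [pvScan, if_pos h, PySem.List.index?_cons_self, Option.getD_some,
            Nat.cast_zero, add_zero]
          have h2 := hIH (f a) a
          rw [if_neg hfM] at h2
          exact h2
        · rw [if_neg h]
          simp only [pvScan, if_neg h]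
          have h2 := hIH mv idx
          rw [if_neg (show ¬ mv < M' by omega)] at h2
          exact h2

theorem pv_translate (l : List Char) :
    l.foldl (fun (acc : List Char) base =>
      if base = 'A' then acc ++ ['A']
      else if base = 'T' then acc ++ ['T']
      else if base = 'C' then acc ++ ['C']
      else acc ++ ['G']) []
    = l.map (fun c => if c ∈ (['A', 'T', 'C'] : List Char) then c else 'G') := by
  have htr : (fun (acc : List Char) (base : Char) =>
      if base = 'A' then acc ++ ['A']
      else if base = 'T' then acc ++ ['T']
      else if base = 'C' then acc ++ ['C']
      else acc ++ ['G'])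
      = (fun (acc : List Char) (base : Char) =>
          acc ++ [if base ∈ (['A', 'T', 'C'] : List Char) then base else 'G']) := by
    funext acc base
    by_cases h1 : base = 'A'
    · subst h1; simp
    · by_cases h2 : base = 'T'
      · subst h2; simp
      · by_cases h3 : base = 'C'
        · subst h3; simp [h1, h2]
        · simp [h1, h2, h3]
  rw [htr, PySem.List.foldl_append_singleton_eq_map]
  simp

-- ---------- B-side: counting what the voting loops compute ----------

-- optCount o q = 1 if o = some x with q x, else 0
def pvOptCnt (o : Option Char) (q : Char → Bool) : Nat :=
  match o with
  | some x => if q x then 1 else 0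
  | none => 0

-- number of index/char pairs of `enumerate cs s` with index c and char satisfying q
theorem pv_enum_cnt (q : Char → Bool) :
    ∀ (cs : List Char) (s c : Int),
    (PySem.List.enumerate cs s).countP (fun jc => decide (jc.1 = c) && q jc.2)
    = pvOptCnt (if s ≤ c then cs[(c - s).toNat]? else none) q := by
  intro cs
  induction cs with
  | nil => intro s c; simp [PySem.List.enumerate_nil, pvOptCnt]
  | cons x cs ih =>
    intro s c
    rw [PySem.List.enumerate_cons, List.countP_cons, ih (s+1) c]
    by_cases hc : c = s
    · subst hc
      rw [if_neg (by omega), if_pos (le_refl _)]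
      simp [pvOptCnt]
    · by_cases hle : s ≤ c
      · rw [if_pos (by omega), if_pos hle]
        have h1 : (c - s).toNat = (c - (s+1)).toNat + 1 := by omega
        rw [h1]
        simp only [List.getElem?_cons_succ]
        simp [pvOptCnt, show ¬ (s = c) from fun h => hc h.symm]
      · rw [if_neg (by omega), if_neg hle]
        simp [pvOptCnt, show ¬ (s = c) from by omega]

-- the positions dict built by the B port, characterised
theorem pv_positions_getD (dl : List Char) (c : Char) :
    ((PySem.List.enumerate dl 0).foldl
      (fun d jc => d.modify jc.2 [] (· ++ [jc.1])) PySem.Dict.empty).getD c []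
    = (((PySem.List.enumerate dl 0).map Prod.swap).filter (fun p => p.1 == c)).map (·.2) := by
  rw [show ((PySem.List.enumerate dl 0).foldl
      (fun d jc => d.modify jc.2 [] (· ++ [jc.1])) (PySem.Dict.empty : PySem.Dict Char (List Int)))
      = (((PySem.List.enumerate dl 0).map Prod.swap).foldl
          (fun d p => d.modify p.1 [] (· ++ [p.2])) PySem.Dict.empty) from by
    rw [List.foldl_map]
    rfl]
  rw [PySem.Dict.getD_foldl_modify_append]
  simp [PySem.Dict.getD_empty]

-- inner vote count for one ref position
theorem pv_inner_cnt (dl : List Char) (c : Char) (e : Int) :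
    ((((PySem.List.enumerate dl 0).map Prod.swap).filter (fun p => p.1 == c)).map (·.2)).countP
      (fun j => decide (j = e))
    = pvOptCnt (if (0:Int) ≤ e then dl[e.toNat]? else none) (fun y => y == c) := by
  rw [List.countP_map, List.countP_filter, List.countP_map]
  have h := pv_enum_cnt (fun y => y == c) dl 0 e
  simp only [sub_zero] at h
  rw [← h]
  apply List.countP_congr
  intro jc _
  simp [Prod.swap]

-- takeWhile: every taken element satisfies the predicate
theorem pv_tw_sat (pr : Int → Bool) :
    ∀ (js : List Int) (i : Nat), i < (js.takeWhile pr).length → pr (js.getD i 0) = true := by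
  intro js
  induction js with
  | nil => intro i h; simp [List.takeWhile] at h
  | cons j js ih =>
    intro i h
    by_cases hj : pr j
    · rw [List.takeWhile_cons_of_pos hj] at h
      cases i with
      | zero => simpa using hj
      | succ i' => exact ih i' (by simpa using h)
    · rw [List.takeWhile_cons_of_neg hj] at h
      simp at h

-- takeWhile: the first element not taken fails the predicate
theorem pv_tw_boundary (pr : Int → Bool) :
    ∀ (js : List Int), (js.takeWhile pr).length < js.length →
    pr (js.getD (js.takeWhile pr).length 0) = false := by
  intro js
  induction js with
  | nil => intro h; simp at h
  | cons j js ih =>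
    intro h
    by_cases hj : pr j
    · rw [List.takeWhile_cons_of_pos hj] at h ⊢
      simpa using ih (by simpa using h)
    · rw [List.takeWhile_cons_of_neg hj]
      simpa using hj

-- a (· ≤ ·)-pairwise list is monotone in getD
theorem pv_sorted_getD (js : List Int) (hs : js.Pairwise (· ≤ ·)) (i j : Nat)
    (hij : i ≤ j) (hj : j < js.length) : js.getD i 0 ≤ js.getD j 0 := by
  rcases Nat.lt_or_ge i j with hlt | hge
  · rw [List.getD_eq_getElem _ _ (by omega), List.getD_eq_getElem _ _ hj]
    exact List.pairwise_iff_getElem.mp hs i j (by omega) hj hlt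
  · have : i = j := by omega
    subst this
    exact le_refl _

-- binary search computes the clamped boundary of the (< x)-prefix
theorem pv_bisect_spec (js : List Int) (x : Int) (hs : js.Pairwise (· ≤ ·)) :
    ∀ (fuel lo hi : Nat), hi - lo ≤ fuel → hi ≤ js.length →
    pvBisectGo js x fuel lo hi
      = max lo (min hi (js.takeWhile (fun j => decide (j < x))).length) := by
  intro fuel
  induction fuel with
  | zero =>
    intro lo hi hfu hhi
    simp only [pvBisectGo]
    omega
  | succ f ih =>
    intro lo hi hfu hhi
    by_cases hlh : lo < hi
    · rw [pvBisectGo, if_pos hlh]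
      by_cases hmid : js.getD ((lo + hi) / 2) 0 < x
      · rw [if_pos hmid, ih ((lo + hi) / 2 + 1) hi (by omega) hhi]
        have hT : (lo + hi) / 2 < (js.takeWhile (fun j => decide (j < x))).length := by
          by_contra hcon
          have hlen : (js.takeWhile (fun j => decide (j < x))).length < js.length := by omega
          have hb := pv_tw_boundary (fun j => decide (j < x)) js hlen
          have hmono := pv_sorted_getD js hs (js.takeWhile (fun j => decide (j < x))).length
            ((lo + hi) / 2) (by omega) (by omega)
          simp only [decide_eq_false_iff_not, not_lt] at hb
          omega
        omega
      · rw [if_neg hmid, ih lo ((lo + hi) / 2) (by omega) (by omega)]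
        have hT : (js.takeWhile (fun j => decide (j < x))).length ≤ (lo + hi) / 2 := by
          by_contra hcon
          have := pv_tw_sat (fun j => decide (j < x)) js ((lo + hi) / 2) (by omega)
          simp only [decide_eq_true_eq] at this
          omega
        omega
    · rw [pvBisectGo, if_neg hlh]
      omega

-- dropping the searched prefix IS dropWhile (< x)
theorem pv_bisect_drop (js : List Int) (x : Int) (hs : js.Pairwise (· ≤ ·)) :
    js.drop (pvBisectGo js x js.length 0 js.length) = js.dropWhile (fun j => decide (j < x)) := by
  rw [pv_bisect_spec js x hs js.length 0 js.length (by omega) (le_refl _)]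
  have hT : (js.takeWhile (fun j => decide (j < x))).length ≤ js.length :=
    List.Sublist.length_le (List.takeWhile_sublist _)
  rw [show max 0 (min js.length (js.takeWhile (fun j => decide (j < x))).length)
      = (js.takeWhile (fun j => decide (j < x))).length from by omega]
  calc js.drop (js.takeWhile (fun j => decide (j < x))).length
      = (js.takeWhile (fun j => decide (j < x)) ++ js.dropWhile (fun j => decide (j < x))).drop
          (js.takeWhile (fun j => decide (j < x))).length := by
        rw [List.takeWhile_append_dropWhile]
    _ = js.dropWhile (fun j => decide (j < x)) := List.drop_left ..

-- on a sorted list, dropWhile (< x) is filter (x ≤ ·)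
theorem pv_dropWhile_filter (x : Int) :
    ∀ (js : List Int), js.Pairwise (· ≤ ·) →
    js.dropWhile (fun j => decide (j < x)) = js.filter (fun j => decide (x ≤ j)) := by
  intro js
  induction js with
  | nil => intro _; rfl
  | cons j js ih =>
    intro hs
    by_cases hj : j < x
    · rw [List.dropWhile_cons_of_pos (by simpa using hj)]
      rw [ih hs.of_cons]
      rw [List.filter_cons_of_neg (by simpa using hj)]
    · rw [List.dropWhile_cons_of_neg (by simpa using hj)]
      rw [List.filter_cons_of_pos (by simpa using hj)]
      congr 1
      symm
      apply List.filter_eq_self.mpr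
      intro y hy
      have := (List.pairwise_cons.mp hs).1 y hy
      simp
      omega

-- on a sorted list, takeWhile (≤ p) is filter (≤ p)
theorem pv_takeWhile_filter (p : Int) :
    ∀ (js : List Int), js.Pairwise (· ≤ ·) →
    js.takeWhile (fun j => decide (j ≤ p)) = js.filter (fun j => decide (j ≤ p)) := by
  intro js
  induction js with
  | nil => intro _; rfl
  | cons j js ih =>
    intro hs
    by_cases hj : j ≤ p
    · rw [List.takeWhile_cons_of_pos (by simpa using hj),
          List.filter_cons_of_pos (by simpa using hj), ih hs.of_cons]
    · rw [List.takeWhile_cons_of_neg (by simpa using hj),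
          List.filter_cons_of_neg (by simpa using hj)]
      symm
      apply List.filter_eq_nil_iff.mpr
      intro y hy
      have := (List.pairwise_cons.mp hs).1 y hy
      simp
      omega

-- the while loop is a fold over the window suffix
theorem pv_voteGo_eq (p : Int) (js : List Int) :
    ∀ (fuel i : Nat), js.length - i ≤ fuel → ∀ (v : List Int),
    pvVoteGo p js fuel v i
      = ((js.drop i).takeWhile (fun j => decide (j ≤ p))).foldl
          (fun (v : List Int) j => v.set (p - j).toNat (v.getD (p - j).toNat 0 + 1)) v := by
  intro fuel
  induction fuel with
  | zero =>
    intro i hfu v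
    have hlen : js.length ≤ i := by omega
    simp only [pvVoteGo]
    rw [List.drop_of_length_le hlen]
    rfl
  | succ f ih =>
    intro i hfu v
    by_cases hi : i < js.length
    · have hdrop : js.drop i = js[i] :: js.drop (i + 1) := List.drop_eq_getElem_cons hi
      have hgetD : js.getD i 0 = js[i] := List.getD_eq_getElem _ _ hi
      by_cases hp : js.getD i 0 ≤ p
      · rw [pvVoteGo, if_pos ⟨hi, hp⟩, hdrop,
            List.takeWhile_cons_of_pos (by rw [← hgetD]; simpa using hp), List.foldl_cons,
            ih (i + 1) (by omega)]
        rw [hgetD]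
      · rw [pvVoteGo, if_neg (by rw [hgetD] at hp; rw [hgetD]; exact fun h => hp h.2), hdrop,
            List.takeWhile_cons_of_neg (by rw [← hgetD]; simpa using hp)]
        rfl
    · rw [pvVoteGo, if_neg (by omega), List.drop_of_length_le (by omega)]
      rfl

-- an unconditional vote fold preserves length
theorem pv_fold_set_len (p : Int) :
    ∀ (js' : List Int) (v : List Int),
    (js'.foldl (fun (v : List Int) j => v.set (p - j).toNat (v.getD (p - j).toNat 0 + 1)) v).length
      = v.length := by
  intro js'
  induction js' with
  | nil => intro v; rfl
  | cons j js' ih =>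
    intro v
    rw [List.foldl_cons, ih, List.length_set]

theorem pv_voteGo_len (p : Int) (js : List Int) (v : List Int) (i : Nat) :
    (pvVoteGo p js js.length v i).length = v.length := by
  rw [pv_voteGo_eq p js js.length i (by omega) v, pv_fold_set_len]

-- slot t of an unconditional vote fold over in-window positions
theorem pv_vote_getD (k : Int) (t : Nat) (ht : (t:Int) < k) (p : Int) :
    ∀ (js' : List Int), (∀ j ∈ js', 0 ≤ p - j ∧ p - j < k) →
    ∀ (v : List Int), v.length = k.toNat →
    (js'.foldl (fun (v : List Int) j => v.set (p - j).toNat (v.getD (p - j).toNat 0 + 1)) v).getD t 0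
    = v.getD t 0 + (js'.countP (fun j => decide (j = p - (t:Int))) : Int) := by
  intro js'
  induction js' with
  | nil => intro _ v hv; simp
  | cons j js' ih =>
    intro hwin v hv
    have hw := hwin j (by simp)
    rw [List.foldl_cons, List.countP_cons]
    have hlen : t < v.length := by omega
    rw [ih (fun y hy => hwin y (by simp [hy])) _ (by rw [List.length_set]; exact hv)]
    by_cases hj : j = p - (t:Int)
    · have hslot : (p - j).toNat = t := by omega
      rw [hslot]
      rw [List.getD_eq_getElem _ _ (by rw [List.length_set]; exact hlen),
          List.getElem_set_self, List.getD_eq_getElem _ _ hlen]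
      simp [hj]
      omega
    · have hne : (p - j).toNat ≠ t := by omega
      rw [List.getD_eq_getElem _ _ (by rw [List.length_set]; exact hlen),
          List.getElem_set_ne hne, List.getD_eq_getElem _ _ hlen]
      simp [hj]

-- slot t of one bisect-then-vote step: one vote per position j = p - t
theorem pv_step_getD (k : Int) (t : Nat) (ht : (t:Int) < k) (p : Int)
    (js : List Int) (hs : js.Pairwise (· ≤ ·)) (v : List Int) (hv : v.length = k.toNat) :
    (pvVoteGo p js js.length v (pvBisectGo js (p - k + 1) js.length 0 js.length)).getD t 0
    = v.getD t 0 + (js.countP (fun j => decide (j = p - (t:Int))) : Int) := by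
  rw [pv_voteGo_eq p js js.length _ (by omega) v, pv_bisect_drop js (p - k + 1) hs,
      pv_dropWhile_filter (p - k + 1) js hs,
      pv_takeWhile_filter p (js.filter (fun j => decide (p - k + 1 ≤ j)))
        (hs.sublist List.filter_sublist)]
  rw [List.filter_filter]
  rw [pv_vote_getD k t ht p _ (by
      intro j hj
      have := List.of_mem_filter hj
      simp at this
      omega) v hv]
  congr 2
  rw [List.countP_filter]
  apply List.countP_congr
  intro j _
  by_cases hj : j = p - (t:Int)
  · simp [hj]
    omega
  · simp [hj]

-- the whole voting loop preserves the tally list's length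
theorem pv_votes_len (k : Int) (pos : Char → List Int) :
    ∀ (L : List (Int × Char)) (v : List Int),
    (L.foldl (fun (v : List Int) pc =>
        pvVoteGo pc.1 (pos pc.2) (pos pc.2).length v
          (pvBisectGo (pos pc.2) (pc.1 - k + 1) (pos pc.2).length 0 (pos pc.2).length))
      v).length = v.length := by
  intro L
  induction L with
  | nil => intro v; rfl
  | cons pc L ih =>
    intro v
    rw [List.foldl_cons, ih, pv_voteGo_len]

-- slot t of the whole voting loop: the sum of inner counts over all ref positions
theorem pv_votes_getD (k : Int) (t : Nat) (ht : (t:Int) < k) (pos : Char → List Int)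
    (hpos : ∀ c, (pos c).Pairwise (· ≤ ·)) :
    ∀ (L : List (Int × Char)) (v : List Int), v.length = k.toNat →
    (L.foldl (fun (v : List Int) pc =>
        pvVoteGo pc.1 (pos pc.2) (pos pc.2).length v
          (pvBisectGo (pos pc.2) (pc.1 - k + 1) (pos pc.2).length 0 (pos pc.2).length))
      v).getD t 0
    = v.getD t 0 + ((L.map (fun pc => (pos pc.2).countP (fun j => decide (j = pc.1 - (t:Int))))).sum : Nat) := by
  intro L
  induction L with
  | nil => intro v hv; simp
  | cons pc L ih =>
    intro v hv
    rw [List.foldl_cons, List.map_cons, List.sum_cons]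
    rw [ih _ (by rw [pv_voteGo_len]; exact hv)]
    rw [pv_step_getD k t ht pc.1 (pos pc.2) (hpos pc.2) v hv]
    push_cast
    ring

-- the positions lists are sorted (read indices in increasing order)
theorem pv_positions_sorted (dl : List Char) (c : Char) :
    (((PySem.List.enumerate dl 0).foldl
      (fun d jc => d.modify jc.2 [] (· ++ [jc.1])) PySem.Dict.empty).getD c []).Pairwise
      (· ≤ ·) := by
  rw [pv_positions_getD]
  rw [List.pairwise_map]
  have h1 : (PySem.List.enumerate dl 0).Pairwise (fun p q => p.1 < q.1) :=
    PySem.List.pairwise_lt_enumerate dl 0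
  have h2 : ((PySem.List.enumerate dl 0).map Prod.swap).Pairwise (fun p q => p.2 < q.2) := by
    rw [List.pairwise_map]
    exact h1
  have h3 : (((PySem.List.enumerate dl 0).map Prod.swap).filter (fun p => p.1 == c)).Pairwise
      (fun p q => p.2 < q.2) := h2.sublist List.filter_sublist
  exact h3.imp (fun h => le_of_lt h)

-- J v cs d = matches of cs (read left to right) against v shifted by d
def pvJ (v : List Char) : List Char → Int → Nat
  | [], _ => 0
  | x :: cs, d => pvOptCnt (if 0 ≤ d then v[d.toNat]? else none) (fun y => y == x) + pvJ v cs (d + 1)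

theorem pv_sum_enum (dl : List Char) (t : Int) :
    ∀ (cs : List Char) (s : Int),
    ((PySem.List.enumerate cs s).map (fun pc =>
        pvOptCnt (if 0 ≤ pc.1 - t then dl[(pc.1 - t).toNat]? else none) (fun y => y == pc.2))).sum
    = pvJ dl cs (s - t) := by
  intro cs
  induction cs with
  | nil => intro s; simp [PySem.List.enumerate_nil, pvJ]
  | cons x cs ih =>
    intro s
    rw [PySem.List.enumerate_cons, List.map_cons, List.sum_cons, ih (s+1)]
    rw [show s + 1 - t = (s - t) + 1 from by ring]
    rfl

theorem pv_J_neg (v : List Char) :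
    ∀ (u : Nat) (cs : List Char), pvJ v cs (-(u:Int)) = pvJ v (cs.drop u) 0 := by
  intro u
  induction u with
  | zero => intro cs; simp
  | succ w ih =>
    intro cs
    cases cs with
    | nil => simp [pvJ]
    | cons x cs =>
      simp only [pvJ, List.drop_succ_cons]
      rw [if_neg (by push_cast; omega)]
      rw [show -((w+1:Nat):Int) + 1 = -(w:Int) from by push_cast; ring]
      rw [ih cs]
      simp [pvOptCnt]

theorem pv_J_shift (v : List Char) :
    ∀ (cs : List Char) (d : Int), 0 ≤ d → pvJ v cs (d+1) = pvJ v.tail cs d := by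
  intro cs
  induction cs with
  | nil => intro d _; rfl
  | cons x cs ih =>
    intro d hd
    simp only [pvJ]
    rw [if_pos (by omega), if_pos hd, ih (d+1) (by omega)]
    congr 2
    rw [List.getElem?_tail, show (d+1).toNat = d.toNat + 1 from by omega]

theorem pv_J_window (v : List Char) :
    ∀ (u : List Char), v.length ≤ u.length →
    pvJ v u 0 = (List.range v.length).countP (fun j => decide (u[j]? = v[j]?)) := by
  intro u
  induction u generalizing v with
  | nil =>
    intro hlen
    have : v = [] := List.eq_nil_of_length_eq_zero (by simpa using hlen)
    subst this
    rfl
  | cons x u ih =>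
    intro hlen
    have hlen' : v.length ≤ u.length + 1 := by simpa using hlen
    simp only [pvJ, Int.toNat_zero]
    rw [if_pos (le_refl (0:Int)), pv_J_shift v u 0 (le_refl (0:Int))]
    rw [ih v.tail (by rw [List.length_tail]; omega)]
    cases v with
    | nil => simp [pvOptCnt]
    | cons y v' =>
      simp only [List.tail_cons, List.getElem?_cons_zero]
      rw [List.length_cons, List.range_succ_eq_map, List.countP_cons, List.countP_map]
      have htail : List.countP ((fun j => decide ((x :: u)[j]? = (y :: v')[j]?)) ∘ Nat.succ) (List.range v'.length)
          = List.countP (fun j => decide (u[j]? = v'[j]?)) (List.range v'.length) := by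
        apply List.countP_congr
        intro j _
        simp
      rw [htail]
      have hhead : pvOptCnt (some y) (fun z => z == x)
          = if decide ((x :: u)[0]? = (y :: v')[0]?) = true then 1 else 0 := by
        by_cases h : x = y
        · subst h; simp [pvOptCnt]
        · simp [pvOptCnt, h, Ne.symm h]
      rw [hhead]
      exact Nat.add_comm _ _

-- A-side count, restated over Nat indices
theorem pv_cnt_nat (rl dl : List Char) (t : Nat) :
    pvCnt rl dl (t : Int)
    = (((List.range dl.length).countP (fun j => decide (rl[t + j]? = dl[j]?)) : Nat) : Int) := by
  unfold pvCnt
  congr 1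
  rw [PySem.List.pyRange_zero_nat, List.countP_map]
  apply List.countP_congr
  intro j _
  simp only [Function.comp_apply]
  rw [show ((j : Nat) : Int) + (t : Int) = ((j + t : Nat) : Int) from by push_cast; ring]
  rw [PySem.List.pyGet?_natCast, PySem.List.pyGet?_natCast]
  rw [Nat.add_comm j t]

-- the tally list computed by B's voting loops IS the per-offset match-count list
theorem pv_votes_eq (rl dl : List Char) :
    ((PySem.List.enumerate rl 0).foldl
      (fun (v : List Int) pc =>
        pvVoteGo pc.1
          (((PySem.List.enumerate dl 0).foldl
            (fun d jc => d.modify jc.2 [] (· ++ [jc.1])) PySem.Dict.empty).getD pc.2 [])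
          (((PySem.List.enumerate dl 0).foldl
            (fun d jc => d.modify jc.2 [] (· ++ [jc.1])) PySem.Dict.empty).getD pc.2 []).length v
          (pvBisectGo
            (((PySem.List.enumerate dl 0).foldl
              (fun d jc => d.modify jc.2 [] (· ++ [jc.1])) PySem.Dict.empty).getD pc.2 [])
            (pc.1 - ((rl.length : Int) - (dl.length : Int) + 1) + 1)
            (((PySem.List.enumerate dl 0).foldl
              (fun d jc => d.modify jc.2 [] (· ++ [jc.1])) PySem.Dict.empty).getD pc.2 []).length 0
            (((PySem.List.enumerate dl 0).foldl
              (fun d jc => d.modify jc.2 [] (· ++ [jc.1])) PySem.Dict.empty).getD pc.2 []).length))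
      (List.replicate (max ((rl.length : Int) - (dl.length : Int) + 1) 0).toNat (0 : Int)))
    = (PySem.List.pyRange 0 ((rl.length : Int) - (dl.length : Int) + 1) 1).map (pvCnt rl dl) := by
  set k : Int := (rl.length : Int) - (dl.length : Int) + 1 with hk
  by_cases hkpos : 0 < k
  · -- lengths agree
    have hlen : ∀ (L : List (Int × Char)),
        (L.foldl (fun (v : List Int) pc =>
          pvVoteGo pc.1
            (((PySem.List.enumerate dl 0).foldl
              (fun d jc => d.modify jc.2 [] (· ++ [jc.1])) PySem.Dict.empty).getD pc.2 [])
            (((PySem.List.enumerate dl 0).foldl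
              (fun d jc => d.modify jc.2 [] (· ++ [jc.1])) PySem.Dict.empty).getD pc.2 []).length v
            (pvBisectGo
              (((PySem.List.enumerate dl 0).foldl
                (fun d jc => d.modify jc.2 [] (· ++ [jc.1])) PySem.Dict.empty).getD pc.2 [])
              (pc.1 - k + 1)
              (((PySem.List.enumerate dl 0).foldl
                (fun d jc => d.modify jc.2 [] (· ++ [jc.1])) PySem.Dict.empty).getD pc.2 []).length 0
              (((PySem.List.enumerate dl 0).foldl
                (fun d jc => d.modify jc.2 [] (· ++ [jc.1])) PySem.Dict.empty).getD pc.2 []).length))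
          (List.replicate (max k 0).toNat (0 : Int))).length = (max k 0).toNat := by
      intro L
      rw [pv_votes_len k (fun c => (((PySem.List.enumerate dl 0).foldl
          (fun d jc => d.modify jc.2 [] (· ++ [jc.1])) PySem.Dict.empty).getD c []))]
      exact List.length_replicate
    have hkk : ((k.toNat : Nat) : Int) = k := by omega
    have hrange : PySem.List.pyRange 0 k 1 = (List.range k.toNat).map (fun i : Nat => (i : Int)) := by
      conv_lhs => rw [← hkk]
      exact PySem.List.pyRange_zero_nat k.toNat
    apply List.ext_getElem
    · rw [hlen, List.length_map, hrange, List.length_map, List.length_range]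
      omega
    · intro t h1 h2
      have ht : t < k.toNat := by
        rw [hlen] at h1; omega
      have htI : (t : Int) < k := by omega
      -- left side via getD
      rw [← List.getD_eq_getElem _ 0 h1]
      rw [pv_votes_getD k t htI (fun c => (((PySem.List.enumerate dl 0).foldl
            (fun d jc => d.modify jc.2 [] (· ++ [jc.1])) PySem.Dict.empty).getD c []))
          (fun c => pv_positions_sorted dl c)
          (PySem.List.enumerate rl 0) _ (by rw [List.length_replicate]; omega)]
      -- initial tally is 0
      rw [List.getD_eq_getElem _ 0 (by rw [List.length_replicate]; omega), List.getElem_replicate]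
      -- rewrite each inner count
      have hmapc : ((PySem.List.enumerate rl 0).map (fun pc =>
            ((((PySem.List.enumerate dl 0).foldl
              (fun d jc => d.modify jc.2 [] (· ++ [jc.1])) PySem.Dict.empty).getD pc.2 []).countP
              (fun j => decide (j = pc.1 - (t:Int))))))
          = ((PySem.List.enumerate rl 0).map (fun pc =>
              pvOptCnt (if 0 ≤ pc.1 - (t:Int) then dl[(pc.1 - (t:Int)).toNat]? else none)
                (fun y => y == pc.2))) := by
        apply List.map_congr_left
        intro pc _
        rw [pv_positions_getD, pv_inner_cnt]
      rw [hmapc, pv_sum_enum dl (t:Int) rl 0]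
      rw [show (0 : Int) - (t:Int) = -((t:Nat):Int) from by omega]
      rw [pv_J_neg dl t rl,
          pv_J_window dl (rl.drop t) (by rw [List.length_drop]; omega)]
      have hcg : (List.range dl.length).countP (fun j => decide ((rl.drop t)[j]? = dl[j]?))
          = (List.range dl.length).countP (fun j => decide (rl[t + j]? = dl[j]?)) := by
        apply List.countP_congr
        intro j _
        rw [List.getElem?_drop]
      rw [hcg]
      -- right side: element t of the mapped range is pvCnt at offset t
      have hx : (List.map (pvCnt rl dl) (PySem.List.pyRange 0 k 1))[t]? = some (pvCnt rl dl ((t : Nat) : Int)) := by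
        rw [hrange]
        simp [ht]
      have hr : (List.map (pvCnt rl dl) (PySem.List.pyRange 0 k 1))[t]'h2 = pvCnt rl dl ((t : Nat) : Int) := by
        have hge := List.getElem?_eq_getElem h2
        rw [hx] at hge
        exact (Option.some.inj hge).symm
      rw [hr, pv_cnt_nat]
      omega
  · -- k ≤ 0 : both lists are empty
    have h0 : (max k 0).toNat = 0 := by omega
    rw [h0]
    have hnil : PySem.List.pyRange 0 k 1 = [] := PySem.List.pyRange_one_eq_nil (by omega)
    rw [hnil, List.map_nil]
    apply List.eq_nil_of_length_eq_zero
    rw [pv_votes_len k (fun c => (((PySem.List.enumerate dl 0).foldl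
        (fun d jc => d.modify jc.2 [] (· ++ [jc.1])) PySem.Dict.empty).getD c []))]
    rfl

theorem best_match_spec' (ref read : String) : best_match ref read = best_match_alt ref read := by
  unfold best_match best_match_alt
  simp only []
  rw [pv_outerA ref.toList read.toList
      (((ref.toList.length : Int) - (read.toList.length : Int) + 1 - 0).toNat) 0
      ((ref.toList.length : Int) - (read.toList.length : Int) + 1) rfl 0 0 (le_refl 0)]
  rw [pv_votes_eq ref.toList read.toList]
  have hscan := pv_scan_spec (pvCnt ref.toList read.toList)
      (((ref.toList.length : Int) - (read.toList.length : Int) + 1 - 0).toNat) 0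
      ((ref.toList.length : Int) - (read.toList.length : Int) + 1) rfl 0 0
  rcases hmax : PySem.List.max?
      ((PySem.List.pyRange 0 ((ref.toList.length : Int) - (read.toList.length : Int) + 1) 1).map
        (pvCnt ref.toList read.toList)) id with _ | M
  · rw [hmax] at hscan
    dsimp only at hscan
    rw [hscan]
    dsimp only
    rw [pv_translate]
  · rw [hmax] at hscan
    dsimp only at hscan
    by_cases hM : (0 : Int) < M
    · rw [if_pos hM] at hscan
      rw [hscan]
      dsimp only
      rw [pv_translate]
      simp only [zero_add]
    · rw [if_neg hM] at hscan
      rw [hscan]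
      dsimp only
      -- every count is >= 0 and the max is <= 0, so the first count is the max and index? finds it at 0
      have hidx : (((PySem.List.index?
          ((PySem.List.pyRange 0 ((ref.toList.length : Int) - (read.toList.length : Int) + 1) 1).map
            (pvCnt ref.toList read.toList)) M).getD 0 : Nat) : Int) = 0 := by
        rcases hcs : (PySem.List.pyRange 0 ((ref.toList.length : Int) - (read.toList.length : Int) + 1) 1).map
            (pvCnt ref.toList read.toList) with _ | ⟨c, cs'⟩
        · rw [hcs] at hmax
          exact absurd hmax (by simp [PySem.List.max?])
        · rw [hcs] at hmax
          have hcle : c ≤ M := PySem.List.max?_isMax hmax c (by simp)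
          have hc0 : 0 ≤ c := by
            have : c ∈ (PySem.List.pyRange 0 ((ref.toList.length : Int) - (read.toList.length : Int) + 1) 1).map
                (pvCnt ref.toList read.toList) := by rw [hcs]; simp
            obtain ⟨j, _, hj⟩ := List.mem_map.mp this
            rw [← hj]; exact pv_cnt_nonneg _ _ _
          have hcM : c = M := by omega
          rw [hcM, PySem.List.index?_cons_self]
          simp
      rw [hidx]
      rw [pv_translate]

-- ===== VERDICT (by name: the statement is the Claim_ definition above) =====
theorem best_match_spec : Claim_equal_best_match := by
  intro ref read _
  unfold Spec_best_match
  exact best_match_spec' ref read
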